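-- pv_equiv track=rewrite | github.com/Ugniusss/Coding-stuff-you-can-check- | Python/Cryptography Project/functions.py | CosetLeader
-- ===== SOURCE A (Python) =====
-- def MkartM(m, G):
--     m = toMatrix(m)
--     G = toMatrix(G)
--
--     result = []
--
--     for i in range(getEil(m)):
--         row = []
--
--         for j in range(getStulp(G)):
--             s = 0
--
--             for k in range(getEil(G)):
--                 s += m[i][k] * G[k][j]
--
--             row.append(s % 2)
--
--         result.append(row)
--     return result
--
-- def trans(H):
--     H = toMatrix(H)
--     eil = getEil(H)
--     stulp = getStulp(H)
--     T = []
--     for j in range(stulp):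
--         row = []
--
--         for i in range(eil):
--             row.append(H[i][j])
--
--         T.append(row)
--
--     return T
--
-- def toMatrix(A):
--     if isinstance(A[0], list):
--         return A
--     else:
--         return [A]
--
-- def getEil(A):
--     A = toMatrix(A)
--     return len(A)
--
-- def getStulp(A):
--     A = toMatrix(A)
--
--     return len(A[0])
--
-- def intToBinaryVector(i, length):
--     binary_string = format(i, f"0{length}b")
--     binary_vector = []
--
--     for i in binary_string:
--         bit = int(i)
--         binary_vector.append(bit)
--
--     return binary_vector
--
-- def Counteris1(A):
--     A = toMatrix(A)
--     count = 0
--     for row in A: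
--         for val in row:
--             if val == 1:
--                 count += 1
--     return count
--
-- def Syndrome(H, r):
--     r = toMatrix(r)
--     r_T = trans(r)
--     product = MkartM(H, r_T)
--     product_T = trans(product)
--     syndrome = tuple(product_T[0])
--
--     return syndrome
--
-- def CosetLeader(H):
--     coset_leaders = {}
--
--     for i in range(2 ** getStulp(H)):
--         cosetuKlaidos = intToBinaryVector(i, getStulp(H))
--         weight = Counteris1(cosetuKlaidos)
--         syndrome = Syndrome(H, cosetuKlaidos)
--         if syndrome not in coset_leaders:
--             coset_leaders[syndrome] = weight
--         else:
--             if weight < coset_leaders[syndrome]: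
--                 coset_leaders[syndrome] = weight
--
--     return coset_leaders
-- ===== SOURCE B (Python) =====
-- def CosetLeader(H):
--     n = len(H[0])
--     m = len(H)
--     leaders = {}
--     for i in range(2 ** n):
--         w = 0
--         acc = [0] * m
--         x = i
--         j = n - 1
--         while x:
--             if x & 1:
--                 w += 1
--                 acc = [a + row[j] for a, row in zip(acc, H)]
--             x >>= 1
--             j -= 1
--         s = tuple(a % 2 for a in acc)
--         if s not in leaders or w < leaders[s]:
--             leaders[s] = w
--     return leaders
-- ===== Notes on version B (the rewrite author's own statement) =====
-- stated objective: faster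
-- what changed: B drops A's per-candidate machinery (binary-string formatting, toMatrix/transpose calls and a full matrix product per error vector) and instead walks the counter's bits with shift/mask, accumulating only the columns of H at set bit positions and counting weight on the fly; same enumeration order, so the same dict.
-- outside the precondition, e.g. on CosetLeader([]): A raises IndexError, B raises IndexError; on CosetLeader([[1, 2], [3]]): A raises IndexError, B raises IndexError; on CosetLeader([[]]): A raises IndexError, B returns {(0,): 0}
import Mathlib
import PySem

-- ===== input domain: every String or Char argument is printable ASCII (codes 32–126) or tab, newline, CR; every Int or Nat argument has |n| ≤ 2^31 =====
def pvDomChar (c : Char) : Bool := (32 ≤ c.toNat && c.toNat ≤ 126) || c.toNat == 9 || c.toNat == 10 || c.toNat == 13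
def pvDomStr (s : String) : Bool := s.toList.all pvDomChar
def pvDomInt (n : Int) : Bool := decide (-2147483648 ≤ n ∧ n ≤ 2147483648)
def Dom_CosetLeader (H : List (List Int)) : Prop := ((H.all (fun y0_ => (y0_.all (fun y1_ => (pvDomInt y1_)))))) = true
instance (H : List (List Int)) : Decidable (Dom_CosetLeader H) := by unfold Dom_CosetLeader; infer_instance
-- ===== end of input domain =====

-- B replaces A's per-candidate matrix machinery (binary-string formatting, two transposes, a full
-- matrix product) by bit-twiddling over the counter with direct column accumulation; measurably
-- faster by a constant factor, same enumeration order, so the returned dict is identical.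

-- ===== PORT A =====
-- toMatrix(A): isinstance(A[0], list) is True for every List (List Int); evaluating A[0] raises
-- IndexError on [] — excluded by Pre_.
def pyToMatrix (A : List (List Int)) : List (List Int) := A

def getEil (A : List (List Int)) : Int := (pyToMatrix A).length

-- A[0]: raises on [] in Python — excluded by Pre_ (headD is never the default there)
def getStulp (A : List (List Int)) : Int := ((pyToMatrix A).headD []).length

-- m[i][k], G[k][j]: pyGetD total form; in range under Pre_ at every call site
def MkartM (m G : List (List Int)) : List (List Int) :=
  (PySem.List.pyRange 0 (getEil (pyToMatrix m))).foldl (fun result i =>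
    result ++ [(PySem.List.pyRange 0 (getStulp (pyToMatrix G))).foldl (fun row j =>
      row ++ [PySem.Int.mod ((PySem.List.pyRange 0 (getEil (pyToMatrix G))).foldl (fun s k =>
        s + PySem.List.pyGetD (PySem.List.pyGetD (pyToMatrix m) i []) k 0 *
            PySem.List.pyGetD (PySem.List.pyGetD (pyToMatrix G) k []) j 0) 0) 2]) []]) []

def pyTrans (Hm : List (List Int)) : List (List Int) :=
  (PySem.List.pyRange 0 (getStulp (pyToMatrix Hm))).foldl (fun T j =>
    T ++ [(PySem.List.pyRange 0 (getEil (pyToMatrix Hm))).foldl (fun row i =>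
      row ++ [PySem.List.pyGetD (PySem.List.pyGetD (pyToMatrix Hm) i []) j 0]) []]) []

-- format(i, f"0{length}b") for i ≥ 0 (every call here has i ≥ 0): binary digits of i …
-- (the first Nat is fuel, a termination device only: fuel = x always suffices since x halves)
def binDigitsGo : Nat → Nat → List Int
  | 0, x => [(x : Int)]
  | fuel + 1, x =>
      if x < 2 then [(x : Int)] else binDigitsGo fuel (x / 2) ++ [((x % 2 : Nat) : Int)]

def binDigits (x : Nat) : List Int := binDigitsGo x x

-- … left-padded with '0' to `length`; each character is then turned back into the digit 0/1.
-- i ≥ 0 and length ≥ 0 at every call (loop counter from range, matrix width), so .toNat is exact.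
def intToBinaryVector (i length : Int) : List Int :=
  List.replicate (length.toNat - (binDigits i.toNat).length) 0 ++ binDigits i.toNat

-- Counteris1 is called on the flat vector; toMatrix wraps it into the single row [A]
def Counteris1 (A : List Int) : Int :=
  [A].foldl (fun count row => row.foldl (fun count val =>
    if val = 1 then count + 1 else count) count) 0

def Syndrome (Hm : List (List Int)) (r : List Int) : List Int :=
  let rM : List (List Int) := [r]          -- toMatrix(r): r[0] is an int (r is never empty here)
  let r_T := pyTrans rM
  let product := MkartM Hm r_T
  let product_T := pyTrans product
  PySem.List.pyGetD product_T 0 []         -- product_T[0]; nonempty under Pre_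

-- 2 ** getStulp(H): the exponent is a length, hence ≥ 0, so .toNat is exact
def CosetLeader (H : List (List Int)) : List (List Int × Int) :=
  ((PySem.List.pyRange 0 ((2 : Int) ^ (getStulp H).toNat)).foldl (fun coset_leaders i =>
    let cosetuKlaidos := intToBinaryVector i (getStulp H)
    let weight := Counteris1 cosetuKlaidos
    let syndrome := Syndrome H cosetuKlaidos
    if PySem.Dict.contains coset_leaders syndrome = false then
      PySem.Dict.insert coset_leaders syndrome weight
    else if weight < PySem.Dict.getD coset_leaders syndrome 0 then  -- key present in this branch
      PySem.Dict.insert coset_leaders syndrome weight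
    else coset_leaders) PySem.Dict.empty).items

-- ===== PORT B =====
-- the `while x:` loop of Source B; x = i ≥ 0 so it is a Nat; row[j] in range under Pre_ (pyGetD total form)
-- (the first Nat is fuel, a termination device only: fuel = x always suffices since x halves)
def bitLoopGo (H : List (List Int)) : Nat → Nat → Int → List Int → Int → List Int × Int
  | 0, _, _, acc, w => (acc, w)
  | fuel + 1, x, j, acc, w =>
      if x = 0 then (acc, w)
      else
        let aw := if x % 2 = 1 then
            ((acc.zip H).map (fun p => p.1 + PySem.List.pyGetD p.2 j 0), w + 1)
          else (acc, w)
        bitLoopGo H fuel (x / 2) (j - 1) aw.1 aw.2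

def bitLoop (H : List (List Int)) (x : Nat) (j : Int) (acc : List Int) (w : Int) :
    List Int × Int := bitLoopGo H x x j acc w

def CosetLeader_alt (H : List (List Int)) : List (List Int × Int) :=
  let n := (H.headD []).length             -- len(H[0]); [] excluded by Pre_
  let m := H.length
  ((PySem.List.pyRange 0 ((2 : Int) ^ n)).foldl (fun leaders i =>
    let aw := bitLoop H i.toNat ((n : Int) - 1) (List.replicate m 0) 0
    let s := aw.1.map (fun a => PySem.Int.mod a 2)
    if PySem.Dict.contains leaders s = false ∨ aw.2 < PySem.Dict.getD leaders s 0 then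
      PySem.Dict.insert leaders s aw.2
    else leaders) PySem.Dict.empty).items

-- ===== PRECONDITION & SPEC =====
-- Pre_ excludes exactly the inputs where the Python A raises IndexError: H == [] (toMatrix reads
-- H[0]) or some row of H shorter than max(1, len(H[0])) (MkartM reads H[i][k] for k < len(H[0]),
-- and H[i][0] even when len(H[0]) = 0).
def Pre_CosetLeader (H : List (List Int)) : Prop :=
  H ≠ [] ∧ ∀ row ∈ H, max 1 (H.headD []).length ≤ row.length
instance (H : List (List Int)) : Decidable (Pre_CosetLeader H) := by
  unfold Pre_CosetLeader; infer_instance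

def pvWitness_CosetLeader : List (List Int) := [[1, 0, 1], [0, 1, 1]]

def Spec_CosetLeader (H : List (List Int)) (out : List (List Int × Int)) : Prop :=
  out = CosetLeader_alt H
instance (H : List (List Int)) (out : List (List Int × Int)) :
    Decidable (Spec_CosetLeader H out) := by unfold Spec_CosetLeader; infer_instance

-- ===== CLAIM (what is proved, stated in full; the proofs are below) =====
def Claim_equal_CosetLeader : Prop :=
  ∀ (H : List (List Int)), Dom_CosetLeader H → Pre_CosetLeader H →
    Spec_CosetLeader H (CosetLeader H)

-- ===== LEMMAS AND PROOFS =====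

-- spec recursions mirroring bitLoop, one row at a time
def rowSum (row : List Int) (x : Nat) (j : Int) : Int :=
  if x = 0 then 0
  else (if x % 2 = 1 then PySem.List.pyGetD row j 0 else 0) + rowSum row (x / 2) (j - 1)
  termination_by x
  decreasing_by omega

def pcount (x : Nat) : Int :=
  if x = 0 then 0 else ((x % 2 : Nat) : Int) + pcount (x / 2)
  termination_by x
  decreasing_by omega

theorem rowSum_unfold (row : List Int) (x : Nat) (j : Int) :
    rowSum row x j = (if x % 2 = 1 then PySem.List.pyGetD row j 0 else 0)
      + rowSum row (x / 2) (j - 1) := by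
  by_cases h : x = 0
  · subst h
    rw [rowSum, rowSum]
    simp
  · rw [rowSum]; simp [h]

theorem pcount_unfold (x : Nat) :
    pcount x = ((x % 2 : Nat) : Int) + pcount (x / 2) := by
  by_cases h : x = 0
  · subst h
    rw [pcount, pcount]
    simp
  · rw [pcount]; simp [h]

theorem binDigitsGo_eq (x : Nat) : ∀ f : Nat, x ≤ f → binDigitsGo f x = binDigits x := by
  induction x using Nat.strong_induction_on with
  | _ x IH =>
    intro f hf
    match f, x with
    | 0, x =>
      interval_cases x
      rfl
    | f + 1, x =>
      by_cases h2 : x < 2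
      · unfold binDigits
        interval_cases x <;> rfl
      · have hx2 : x / 2 < x := by omega
        obtain ⟨y, rfl⟩ : ∃ y, x = y + 1 := ⟨x - 1, by omega⟩
        rw [binDigitsGo, if_neg h2, IH _ hx2 f (by omega)]
        unfold binDigits
        rw [binDigitsGo, if_neg h2, IH _ hx2 y (by omega)]
        rfl

theorem binDigits_lt_two (x : Nat) (h : x < 2) : binDigits x = [(x : Int)] := by
  unfold binDigits
  interval_cases x <;> rfl

theorem binDigits_two_le (x : Nat) (h : 2 ≤ x) :
    binDigits x = binDigits (x / 2) ++ [((x % 2 : Nat) : Int)] := by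
  obtain ⟨y, rfl⟩ : ∃ y, x = y + 1 := ⟨x - 1, by omega⟩
  conv_lhs => rw [binDigits]
  rw [binDigitsGo, if_neg (by omega), binDigitsGo_eq _ y (by omega)]

theorem bitLoopGo_eq (H : List (List Int)) (x : Nat) :
    ∀ f : Nat, x ≤ f → ∀ j acc w, bitLoopGo H f x j acc w = bitLoop H x j acc w := by
  induction x using Nat.strong_induction_on with
  | _ x IH =>
    intro f hf j acc w
    match f, x with
    | 0, x =>
      have : x = 0 := by omega
      subst this
      rfl
    | f + 1, x =>
      by_cases h0 : x = 0
      · subst h0; rfl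
      · obtain ⟨y, rfl⟩ : ∃ y, x = y + 1 := ⟨x - 1, by omega⟩
        rw [bitLoopGo, if_neg h0, IH _ (by omega) f (by omega)]
        unfold bitLoop
        rw [bitLoopGo, if_neg h0, IH _ (by omega) y (by omega)]
        rfl

theorem bitLoop_zero (H : List (List Int)) (j : Int) (acc : List Int) (w : Int) :
    bitLoop H 0 j acc w = (acc, w) := rfl

theorem bitLoop_succ (H : List (List Int)) (x : Nat) (hx : x ≠ 0) (j : Int)
    (acc : List Int) (w : Int) :
    bitLoop H x j acc w =
      (let aw := if x % 2 = 1 then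
          ((acc.zip H).map (fun p => p.1 + PySem.List.pyGetD p.2 j 0), w + 1)
        else (acc, w)
       bitLoop H (x / 2) (j - 1) aw.1 aw.2) := by
  obtain ⟨y, rfl⟩ : ∃ y, x = y + 1 := ⟨x - 1, by omega⟩
  conv_lhs => rw [bitLoop]
  rw [bitLoopGo, if_neg hx, bitLoopGo_eq H _ y (by omega)]

theorem length_binDigits_pos (x : Nat) : 1 ≤ (binDigits x).length := by
  by_cases h : x < 2
  · rw [binDigits_lt_two x h]; simp
  · rw [binDigits_two_le x (by omega)]; simp

theorem length_binDigits_le (n : Nat) : ∀ x : Nat, x < 2 ^ n → 1 ≤ n →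
    (binDigits x).length ≤ n := by
  induction n with
  | zero => omega
  | succ n IH =>
    intro x hx _
    by_cases h2 : x < 2
    · rw [binDigits_lt_two x h2]; simp
    · have hn : 1 ≤ n := by
        rcases Nat.eq_zero_or_pos n with h | h
        · subst h; simp at hx; omega
        · exact h
      have hx2 : x / 2 < 2 ^ n := by
        rw [pow_succ] at hx; omega
      rw [binDigits_two_le x (by omega)]
      have := IH (x / 2) hx2 hn
      simp
      omega

-- padded-vector recursion: peeling the last (least significant) bit
theorem iv_rec (x n : Nat) (hn : 2 ≤ n) :
    List.replicate (n - (binDigits x).length) 0 ++ binDigits x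
      = (List.replicate ((n - 1) - (binDigits (x / 2)).length) 0 ++ binDigits (x / 2))
        ++ [((x % 2 : Nat) : Int)] := by
  by_cases h2 : x < 2
  · have hx2 : x / 2 = 0 := by omega
    have hm : x % 2 = x := by omega
    rw [binDigits_lt_two x h2, hx2, binDigits_lt_two 0 (by omega), hm]
    have e : List.replicate (n - 1 - [((0 : Nat) : Int)].length) (0 : Int)
        ++ [((0 : Nat) : Int)] = List.replicate (n - 1) 0 := by
      simp only [List.length_singleton, Nat.cast_zero]
      rw [← List.replicate_succ']
      congr 1
      omega
    rw [e]
    congr 2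
  · rw [binDigits_two_le x (by omega)]
    rw [← List.append_assoc]
    congr 2
    simp
    omega

theorem length_iv (x n : Nat) (hx : x < 2 ^ n) (hn : 1 ≤ n) :
    (List.replicate (n - (binDigits x).length) 0 ++ binDigits x).length = n := by
  have h1 := length_binDigits_le n x hx hn
  simp
  omega

-- re-zipping a mapped zip with the same right list
theorem zip_map_zip (acc : List Int) : ∀ (Hs : List (List Int))
    (g h : Int → List Int → Int),
    (((acc.zip Hs).map (fun p => g p.1 p.2)).zip Hs).map (fun p => h p.1 p.2)
      = (acc.zip Hs).map (fun p => h (g p.1 p.2) p.2) := by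
  induction acc with
  | nil => intro Hs g h; simp
  | cons a t ih =>
    intro Hs g h
    cases Hs with
    | nil => simp
    | cons r rs => simp [ih]

theorem bitLoop_spec (H : List (List Int)) : ∀ (x : Nat) (j : Int) (acc : List Int) (w : Int),
    acc.length = H.length →
    bitLoop H x j acc w
      = ((acc.zip H).map (fun p => p.1 + rowSum p.2 x j), w + pcount x) := by
  have hz : ∀ (row : List Int) (j : Int), rowSum row 0 j = 0 := by
    intro row j; rw [rowSum]; simp
  have pz : pcount 0 = 0 := by rw [pcount]; simp
  intro x
  induction x using Nat.strong_induction_on with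
  | _ x IH =>
    intro j acc w hlen
    by_cases h0 : x = 0
    · subst h0
      rw [bitLoop_zero]
      simp [hz, pz]
      rw [show (fun p : Int × List Int => p.1) = Prod.fst from rfl,
        List.map_fst_zip (le_of_eq hlen)]
    · rw [bitLoop_succ H x h0]
      by_cases hpar : x % 2 = 1
      · simp only [hpar, reduceIte]
        rw [IH (x / 2) (by omega) (j - 1) _ (w + 1) (by simp [hlen])]
        rw [zip_map_zip acc H (fun a r => a + PySem.List.pyGetD r j 0)
          (fun a r => a + rowSum r (x / 2) (j - 1))]
        simp only [Prod.mk.injEq]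
        refine ⟨?_, ?_⟩
        · apply List.map_congr_left
          intro p _
          rw [rowSum_unfold p.2 x j, if_pos hpar]
          ring
        · rw [pcount_unfold x, hpar]
          push_cast
          ring
      · simp only [hpar, reduceIte]
        rw [IH (x / 2) (by omega) (j - 1) acc w hlen]
        simp only [Prod.mk.injEq]
        refine ⟨?_, ?_⟩
        · apply List.map_congr_left
          intro p _
          rw [rowSum_unfold p.2 x j, if_neg hpar]
          ring
        · rw [pcount_unfold x, show x % 2 = 0 by omega]
          push_cast
          ring

-- A's inner dot product: Σ_k row[k] * v[k] over k < len(v)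
def dotA (row v : List Int) : Int :=
  (PySem.List.pyRange 0 (v.length : Int)).foldl
    (fun s k => s + PySem.List.pyGetD row k 0 * PySem.List.pyGetD v k 0) 0

theorem pyRange01 : PySem.List.pyRange 0 1 = [0] := by decide

theorem dotA_append (row u : List Int) (b : Int) :
    dotA row (u ++ [b]) = dotA row u + PySem.List.pyGetD row (u.length : Int) 0 * b := by
  unfold dotA
  rw [show ((u ++ [b]).length : Int) = (u.length : Int) + 1 by simp]
  rw [PySem.List.pyRange_one_succ_right (by positivity)]
  rw [List.foldl_append]
  simp only [List.foldl_cons, List.foldl_nil]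
  congr 1
  · apply PySem.List.foldl_congr_mem
    intro s k hk
    obtain ⟨hk0, hk1⟩ := PySem.List.mem_pyRange_one.mp hk
    congr 1
    congr 1
    rw [PySem.List.pyGetD_eq_getElem (u ++ [b]) 0 hk0 (by simp; omega),
        PySem.List.pyGetD_eq_getElem u 0 hk0 (by simpa using hk1)]
    rw [List.getElem_append_left (by omega)]
  · congr 1
    rw [PySem.List.pyGetD_natCast]
    simp

theorem map_getD_range (g : List Int → Int) (H : List (List Int)) :
    (PySem.List.pyRange 0 (H.length : Int)).map (fun i => g (PySem.List.pyGetD H i []))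
      = H.map g := by
  have h := PySem.List.map_pyGetD_pyRange_zero H []
  rw [PySem.List.len_eq] at h
  rw [show (fun i => g (PySem.List.pyGetD H i []))
        = g ∘ (fun i => PySem.List.pyGetD H i []) from rfl,
      ← List.map_map, h]

theorem map_getD_range' (v : List Int) :
    (PySem.List.pyRange 0 (v.length : Int)).map (fun j => [PySem.List.pyGetD v j 0])
      = v.map (fun b => [b]) := by
  have h := PySem.List.map_pyGetD_pyRange_zero v 0
  rw [PySem.List.len_eq] at h
  rw [show (fun j => [PySem.List.pyGetD v j 0])
        = (fun b => [b]) ∘ (fun j => PySem.List.pyGetD v j 0) from rfl,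
      ← List.map_map, h]

theorem trans_single (v : List Int) : pyTrans [v] = v.map (fun b => [b]) := by
  simp only [pyTrans, pyToMatrix, getStulp, getEil]
  simp only [List.headD_cons, List.length_cons, List.length_nil, Nat.zero_add,
    Nat.cast_one]
  rw [PySem.List.foldl_append_singleton_eq_map]
  rw [List.nil_append]
  simp only [pyRange01, List.foldl_cons, List.foldl_nil, PySem.List.pyGetD_zero_cons,
    List.nil_append]
  exact map_getD_range' v


theorem MkartM_single (H : List (List Int)) (v : List Int) (hv : v ≠ []) :
    MkartM H (v.map (fun b => [b]))
      = (PySem.List.pyRange 0 (H.length : Int)).map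
          (fun i => [PySem.Int.mod (dotA (PySem.List.pyGetD H i []) v) 2]) := by
  obtain ⟨a, t, rfl⟩ : ∃ a t, v = a :: t := by
    cases v with
    | nil => exact absurd rfl hv
    | cons a t => exact ⟨a, t, rfl⟩
  simp only [MkartM, pyToMatrix, getEil, getStulp]
  unfold dotA
  simp only [List.map_cons, List.headD_cons, List.length_cons, List.length_nil,
    List.length_map, Nat.zero_add, Nat.cast_one]
  rw [PySem.List.foldl_append_singleton_eq_map, List.nil_append]
  apply List.map_congr_left
  intro i _
  simp only [pyRange01, List.foldl_cons, List.foldl_nil, List.nil_append]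
  congr 2
  apply PySem.List.foldl_congr_mem
  intro s k hk
  obtain ⟨hk0, hk1⟩ := PySem.List.mem_pyRange_one.mp hk
  congr 1
  congr 1
  rw [PySem.List.pyGetD_eq_getElem ([a] :: List.map (fun b => [b]) t) [] hk0
        (by simp; omega),
      PySem.List.pyGetD_eq_getElem (a :: t) 0 hk0 (by simp; omega)]
  simp only [List.getElem_cons]
  split
  · simp [PySem.List.pyGetD_zero_cons]
  · simp only [List.getElem_map]
    rw [PySem.List.pyGetD_zero_cons]

theorem syndrome_closed (H : List (List Int)) (v : List Int) (hv : v ≠ []) :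
    Syndrome H v = H.map (fun row => PySem.Int.mod (dotA row v) 2) := by
  unfold Syndrome
  dsimp only
  rw [trans_single v, MkartM_single H v hv]
  cases H with
  | nil => rfl
  | cons h hs =>
    set P := (PySem.List.pyRange 0 ((h :: hs).length : Int)).map
      (fun i => [PySem.Int.mod (dotA (PySem.List.pyGetD (h :: hs) i []) v) 2]) with hP
    have hPhead : P.headD []
        = [PySem.Int.mod (dotA (PySem.List.pyGetD (h :: hs) 0 []) v) 2] := by
      rw [hP, PySem.List.pyRange_one_cons (by simp)]
      simp
    have hPlen : ((P.length : Nat) : Int) = (((h :: hs).length : Nat) : Int) := by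
      rw [hP]
      simp [PySem.List.length_pyRange_one]
    simp only [pyTrans, pyToMatrix, getStulp, getEil]
    rw [hPhead]
    simp only [List.length_cons, List.length_nil, Nat.zero_add, Nat.cast_one, hPlen]
    rw [PySem.List.foldl_append_singleton_eq_map, List.nil_append]
    rw [pyRange01, List.map_singleton]
    rw [PySem.List.pyGetD_zero_cons]
    rw [PySem.List.foldl_append_singleton_eq_map, List.nil_append]
    rw [← map_getD_range (fun row => PySem.Int.mod (dotA row v) 2) (h :: hs)]
    simp only [List.length_cons]
    apply List.map_congr_left
    intro i hi
    obtain ⟨hi0, hi1⟩ := PySem.List.mem_pyRange_one.mp hi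
    have hgP : PySem.List.pyGetD P i []
        = [PySem.Int.mod (dotA (PySem.List.pyGetD (h :: hs) i []) v) 2] := by
      rw [hP]
      exact PySem.List.pyGetD_map_pyRange_of_nonneg _ _ _ _ hi0 hi1
    rw [hgP, PySem.List.pyGetD_zero_cons]

def count1 (A : List Int) : Int :=
  A.foldl (fun c val => if val = 1 then c + 1 else c) 0

theorem Counteris1_eq (A : List Int) : Counteris1 A = count1 A := by
  simp [Counteris1, count1]

theorem rowSum_zero (row : List Int) (j : Int) : rowSum row 0 j = 0 := by
  rw [rowSum]; simp

theorem pcount_zero : pcount 0 = 0 := by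
  rw [pcount]; simp

theorem dot_eq (row : List Int) : ∀ n : Nat, ∀ x : Nat, 1 ≤ n → x < 2 ^ n →
    dotA row (List.replicate (n - (binDigits x).length) 0 ++ binDigits x)
      = rowSum row x ((n : Int) - 1) := by
  intro n
  induction n with
  | zero => omega
  | succ n IH =>
    intro x _ hx
    by_cases hn : n = 0
    · subst hn
      have hx2 : x < 2 := by simpa using hx
      rw [binDigits_lt_two x hx2]
      interval_cases x
      · simp [dotA, pyRange01, PySem.List.pyGetD_zero_cons, rowSum_zero]
      · rw [rowSum_unfold]
        simp [dotA, pyRange01, PySem.List.pyGetD_zero_cons, rowSum_zero]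
    · have hn1 : 1 ≤ n := by omega
      have hx2 : x / 2 < 2 ^ n := by rw [pow_succ] at hx; omega
      rw [iv_rec x (n + 1) (by omega)]
      simp only [Nat.add_sub_cancel]
      rw [dotA_append]
      rw [length_iv (x / 2) n hx2 hn1]
      rw [IH (x / 2) hn1 hx2]
      rw [rowSum_unfold row x (((n + 1 : Nat) : Int) - 1)]
      have c1 : (((n + 1 : Nat) : Int) - 1) = (n : Int) := by push_cast; ring
      rw [c1]
      rcases Nat.mod_two_eq_zero_or_one x with hp | hp
      · simp [hp]
      · simp [hp]
        ring

theorem count1_append (u : List Int) (b : Int) :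
    count1 (u ++ [b]) = count1 u + (if b = 1 then 1 else 0) := by
  unfold count1
  rw [List.foldl_append]
  simp only [List.foldl_cons, List.foldl_nil]
  split <;> simp

theorem cnt_eq : ∀ n : Nat, ∀ x : Nat, 1 ≤ n → x < 2 ^ n →
    count1 (List.replicate (n - (binDigits x).length) 0 ++ binDigits x) = pcount x := by
  intro n
  induction n with
  | zero => omega
  | succ n IH =>
    intro x _ hx
    by_cases hn : n = 0
    · subst hn
      have hx2 : x < 2 := by simpa using hx
      rw [binDigits_lt_two x hx2]
      interval_cases x
      · simp [count1, pcount_zero]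
      · rw [pcount_unfold]
        simp [count1, pcount_zero]
    · have hn1 : 1 ≤ n := by omega
      have hx2 : x / 2 < 2 ^ n := by rw [pow_succ] at hx; omega
      rw [iv_rec x (n + 1) (by omega)]
      simp only [Nat.add_sub_cancel]
      rw [count1_append]
      rw [IH (x / 2) hn1 hx2]
      rw [pcount_unfold x]
      rcases Nat.mod_two_eq_zero_or_one x with hp | hp
      · simp [hp]
      · simp [hp]
        ring

theorem replicate_zip (l : List (List Int)) :
    ((List.replicate l.length (0 : Int)).zip l) = l.map (fun r => ((0 : Int), r)) := by
  induction l with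
  | nil => simp
  | cons r rs ih => simp [List.replicate_succ, ih]

-- the two dict-update shapes are the same update
theorem step_shape (d : PySem.Dict (List Int) Int) (s : List Int) (w : Int) :
    (if PySem.Dict.contains d s = false then PySem.Dict.insert d s w
     else if w < PySem.Dict.getD d s 0 then PySem.Dict.insert d s w else d)
    = (if PySem.Dict.contains d s = false ∨ w < PySem.Dict.getD d s 0 then
        PySem.Dict.insert d s w else d) := by
  by_cases h1 : PySem.Dict.contains d s = false <;>
    by_cases h2 : w < PySem.Dict.getD d s 0 <;> simp [h1, h2]

theorem per_index (H : List (List Int)) (i : Int) (h0 : 0 ≤ i) (hi : i < (2 : Int) ^ (H.headD []).length) :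
    Syndrome H (intToBinaryVector i (getStulp H))
      = (bitLoop H i.toNat (((H.headD []).length : Int) - 1)
          (List.replicate H.length 0) 0).1.map (fun a => PySem.Int.mod a 2)
    ∧ Counteris1 (intToBinaryVector i (getStulp H))
      = (bitLoop H i.toNat (((H.headD []).length : Int) - 1)
          (List.replicate H.length 0) 0).2 := by
  have h2 : ((2 ^ (H.headD []).length : Nat) : Int) = (2 : Int) ^ (H.headD []).length := by
    push_cast
    norm_num
  have hxn : i.toNat < 2 ^ (H.headD []).length := by
    have h3 : ((i.toNat : Nat) : Int) = i := Int.toNat_of_nonneg h0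
    omega
  have hIv : intToBinaryVector i (getStulp H)
      = List.replicate ((H.headD []).length - (binDigits i.toNat).length) 0
          ++ binDigits i.toNat := by
    unfold intToBinaryVector getStulp pyToMatrix
    simp
  have hvne : (List.replicate ((H.headD []).length - (binDigits i.toNat).length) (0 : Int)
      ++ binDigits i.toNat) ≠ [] := by
    intro hcon
    have hpos := length_binDigits_pos i.toNat
    apply_fun List.length at hcon
    simp only [List.length_append, List.length_replicate, List.length_nil] at hcon
    omega
  have hBL := bitLoop_spec H i.toNat (((H.headD []).length : Int) - 1)
    (List.replicate H.length 0) 0 (by simp)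
  have hdot : ∀ row : List Int,
      dotA row (List.replicate ((H.headD []).length - (binDigits i.toNat).length) 0
          ++ binDigits i.toNat)
        = rowSum row i.toNat (((H.headD []).length : Int) - 1) := by
    intro row
    by_cases hn : (H.headD []).length = 0
    · rw [hn] at hxn
      have hx0 : i.toNat = 0 := by simpa using hxn
      rw [hn, hx0, binDigits_lt_two 0 (by omega)]
      simp [dotA, pyRange01, PySem.List.pyGetD_zero_cons, rowSum_zero]
    · exact dot_eq row _ i.toNat (by omega) hxn
  have hcnt : count1 (List.replicate ((H.headD []).length - (binDigits i.toNat).length) 0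
      ++ binDigits i.toNat) = pcount i.toNat := by
    by_cases hn : (H.headD []).length = 0
    · rw [hn] at hxn
      have hx0 : i.toNat = 0 := by simpa using hxn
      rw [hn, hx0, binDigits_lt_two 0 (by omega)]
      simp [count1, pcount_zero]
    · exact cnt_eq _ i.toNat (by omega) hxn
  constructor
  · rw [hIv, syndrome_closed H _ hvne, hBL]
    simp only [replicate_zip, List.map_map]
    apply List.map_congr_left
    intro row _
    simp only [Function.comp]
    rw [hdot row]
    simp
  · rw [hIv, Counteris1_eq, hcnt, hBL]
    simp

-- ===== VERDICT (by name: the statement is the Claim_ definition above) =====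
theorem CosetLeader_spec : Claim_equal_CosetLeader := by
  intro H _ _
  unfold Spec_CosetLeader CosetLeader CosetLeader_alt
  dsimp only
  congr 1
  have hst : (getStulp H).toNat = (H.headD []).length := by
    unfold getStulp pyToMatrix
    simp
  rw [hst]
  apply PySem.List.foldl_congr_mem
  intro d i hi
  obtain ⟨h0, h1⟩ := PySem.List.mem_pyRange_one.mp hi
  obtain ⟨hs, hw⟩ := per_index H i h0 h1
  rw [hs, hw]
  exact step_shape d _ _
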